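-- pv_equiv track=rewrite | github.com/grapheneaffiliate/h4-polytopic-attention | solve_arc_b13.py | solve_9172f3a0
-- ===== SOURCE A (Python) =====
-- def solve_9172f3a0(grid):
--     n = len(grid)
--     scale = n
--     out = []
--     for r in range(n):
--         for _ in range(scale):
--             row = []
--             for c in range(n):
--                 row.extend([grid[r][c]] * scale)
--             out.append(row)
--     return out
-- ===== SOURCE B (Python) =====
-- def solve_9172f3a0(grid):
--     n = len(grid)
--     m = n * n
--     return [[grid[i // n][j // n] for j in range(m)] for i in range(m)]
-- ===== Notes on version B (the rewrite author's own statement) =====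
-- stated objective: alternative
-- what changed: Replaces A's replication-based rebuild (extend with [cell]*scale and append each rebuilt row n times) with direct index arithmetic: every output cell (i,j) of the n^2 x n^2 result is computed as grid[i//n][j//n] in one comprehension, no intermediate row building or duplication.
import Mathlib
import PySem

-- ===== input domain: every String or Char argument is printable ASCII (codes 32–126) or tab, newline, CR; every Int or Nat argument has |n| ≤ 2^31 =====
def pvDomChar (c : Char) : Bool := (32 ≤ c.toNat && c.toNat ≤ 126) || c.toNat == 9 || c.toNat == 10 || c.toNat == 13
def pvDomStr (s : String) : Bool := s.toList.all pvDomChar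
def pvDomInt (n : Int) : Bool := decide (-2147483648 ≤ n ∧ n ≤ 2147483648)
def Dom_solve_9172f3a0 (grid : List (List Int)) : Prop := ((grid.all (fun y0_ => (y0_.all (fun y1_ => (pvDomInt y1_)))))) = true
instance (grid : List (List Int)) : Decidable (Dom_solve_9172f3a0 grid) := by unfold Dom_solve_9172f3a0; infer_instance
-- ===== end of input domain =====

-- B scales the grid by computing each output cell directly as grid[i//n][j//n] over
-- range(n*n), instead of A's replication loop that extends and re-appends rows.

-- ===== PORT A =====
-- literal transliteration of A; grid[r] and grid[r][c] are ported with pyGetD (exact under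
-- Pre_, where every index read is in range); [x]*scale is pyRepeat.
def solve_9172f3a0 (grid : List (List Int)) : List (List Int) :=
  let n : Int := grid.length
  let scale : Int := n
  (PySem.List.pyRange 0 n 1).foldl (fun out r =>
    (PySem.List.pyRange 0 scale 1).foldl (fun out _ =>
      let row := (PySem.List.pyRange 0 n 1).foldl (fun row c =>
        row ++ PySem.List.pyRepeat [PySem.List.pyGetD (PySem.List.pyGetD grid r []) c 0] scale) []
      out ++ [row]) out) []

-- ===== PORT B =====
-- literal transliteration of Source B; // is floordiv, indexing is pyGetD (exact under Pre_).
def solve_9172f3a0_alt (grid : List (List Int)) : List (List Int) :=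
  let n : Int := grid.length
  let m : Int := n * n
  (PySem.List.pyRange 0 m 1).map (fun i =>
    (PySem.List.pyRange 0 m 1).map (fun j =>
      PySem.List.pyGetD (PySem.List.pyGetD grid (PySem.Int.floordiv i n) [])
        (PySem.Int.floordiv j n) 0))

-- ===== PRECONDITION & SPEC =====
-- Pre_ excludes exactly the inputs where A raises IndexError: a grid containing a row
-- shorter than the number of rows (A reads columns 0..n-1 of every row).
def Pre_solve_9172f3a0 (grid : List (List Int)) : Prop :=
  ∀ row ∈ grid, grid.length ≤ row.length
instance (grid : List (List Int)) : Decidable (Pre_solve_9172f3a0 grid) := by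
  unfold Pre_solve_9172f3a0; infer_instance

def pvWitness_solve_9172f3a0 : List (List Int) := [[1, 2], [3, 4]]

def Spec_solve_9172f3a0 (grid : List (List Int)) (out : List (List Int)) : Prop :=
  out = solve_9172f3a0_alt grid
instance (grid : List (List Int)) (out : List (List Int)) : Decidable (Spec_solve_9172f3a0 grid out) := by
  unfold Spec_solve_9172f3a0; infer_instance

-- ===== CLAIM (what is proved, stated in full; the proofs are below) =====
def Claim_equal_solve_9172f3a0 : Prop := ∀ (grid : List (List Int)), Dom_solve_9172f3a0 grid → Pre_solve_9172f3a0 grid → Spec_solve_9172f3a0 grid (solve_9172f3a0 grid)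

-- ===== LEMMAS AND PROOFS =====

-- the block structure of integer division: mapping i ↦ f (i / b) over range (a*b)
-- yields each f r repeated b times, for r = 0 .. a-1
lemma pv_div_block {α : Type} (a b : Nat) (f : Nat → α) :
    (List.range (a * b)).map (fun i => f (i / b))
      = (List.range a).flatMap (fun r => List.replicate b (f r)) := by
  induction a with
  | zero => simp
  | succ a ih =>
    rw [Nat.succ_mul, List.range_add, List.map_append, ih, List.range_succ,
      List.flatMap_append, List.map_map]
    congr 1
    simp only [List.flatMap_cons, List.flatMap_nil, List.append_nil]
    rcases Nat.eq_zero_or_pos b with hb | hb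
    · subst hb; simp
    · rw [List.map_congr_left (g := fun _ => f a), List.map_const', List.length_range]
      intro j hj
      rw [List.mem_range] at hj
      simp only [Function.comp_apply]
      rw [Nat.mul_comm a b, Nat.mul_add_div hb, Nat.div_eq_of_lt hj, Nat.add_zero]

-- A's interleaved triple loop, as one flatMap over the row indices
lemma pv_A_eq (grid : List (List Int)) :
    solve_9172f3a0 grid
      = (List.range grid.length).flatMap (fun r => List.replicate grid.length
          ((List.range grid.length).flatMap (fun c =>
            List.replicate grid.length ((grid.getD r []).getD c 0)))) := by
  simp only [solve_9172f3a0, PySem.List.pyRange_zero_natCast, List.foldl_map,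
    PySem.List.pyGetD_natCast, PySem.List.pyRepeat_singleton, Int.toNat_natCast,
    PySem.List.foldl_append_eq_flatMap,
    ← List.map_eq_flatMap, List.map_const', List.length_range,
    List.nil_append]

-- B's index-arithmetic comprehension, as the same flatMap shape (via pv_div_block twice)
lemma pv_B_eq (grid : List (List Int)) :
    solve_9172f3a0_alt grid
      = (List.range grid.length).flatMap (fun r => List.replicate grid.length
          ((List.range grid.length).flatMap (fun c =>
            List.replicate grid.length ((grid.getD r []).getD c 0)))) := by
  have hm : (grid.length : Int) * (grid.length : Int)
      = ((grid.length * grid.length : Nat) : Int) := by push_cast; ring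
  simp only [solve_9172f3a0_alt, hm, PySem.List.pyRange_zero_natCast, List.map_map]
  simp only [Function.comp_def, PySem.Int.floordiv_natCast, PySem.List.pyGetD_natCast]
  have h1 : (List.range (grid.length * grid.length)).map (fun x =>
        (List.range (grid.length * grid.length)).map (fun j =>
          (grid.getD (x / grid.length) []).getD (j / grid.length) 0))
      = (List.range grid.length).flatMap (fun r => List.replicate grid.length
          ((List.range (grid.length * grid.length)).map (fun j =>
            (grid.getD r []).getD (j / grid.length) 0))) :=
    pv_div_block grid.length grid.length (fun r => (List.range (grid.length * grid.length)).map (fun j => (grid.getD r []).getD (j / grid.length) 0))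
  rw [h1]
  apply List.flatMap_congr
  intro r _
  congr 1
  exact pv_div_block grid.length grid.length (fun c => (grid.getD r []).getD c 0)

-- ===== VERDICT (by name: the statement is the Claim_ definition above) =====
theorem solve_9172f3a0_spec : Claim_equal_solve_9172f3a0 := by
  intro grid _ _
  unfold Spec_solve_9172f3a0
  rw [pv_A_eq, pv_B_eq]
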